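-- pv_equiv track=rewrite | github.com/uditbaliyan/Python_Projects | Advent_of_code/Advent_2025/04_/part_2.py | perform_pass
-- ===== SOURCE A (Python) =====
-- def accessible(neighbors):
--     return neighbors.count("@") < 4
--
-- def neighbors_of(grid, r, c):
--     rows, cols = len(grid), len(grid[0])
--     offsets = [(-1, -1), (-1, 0), (-1, 1), (0, -1), (0, 1), (1, -1), (1, 0), (1, 1)]
--     for dr, dc in offsets:
--         nr, nc = r + dr, c + dc
--         if 0 <= nr < rows and 0 <= nc < cols:
--             yield grid[nr][nc]
--
-- def perform_pass(grid):
--     """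
--     Return number of '@' cells that become 'x' this round.
--     Does not mutate while scanning.
--     """
--     rows, cols = len(grid), len(grid[0])
--     to_flip = []
--
--     for r in range(rows):
--         for c in range(cols):
--             if grid[r][c] == "@":
--                 neigh = list(neighbors_of(grid, r, c))
--                 if accessible(neigh):
--                     to_flip.append((r, c))
--
--     for r, c in to_flip:
--         grid[r][c] = "x"
--
--     return len(to_flip)
-- ===== SOURCE B (Python) =====
-- def perform_pass(grid):
--     """
--     Return number of '@' cells that become 'x' this round.
--     Flips in place while scanning, reading from a snapshot.
--     """
--     rows, cols = len(grid), len(grid[0])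
--     snap = [row[:cols] for row in grid]
--     flipped = 0
--     for r in range(rows):
--         for c in range(cols):
--             if snap[r][c] == "@":
--                 block = 0
--                 for seg_row in snap[max(0, r - 1):r + 2]:
--                     block += seg_row[max(0, c - 1):c + 2].count("@")
--                 if block - 1 < 4:  # block includes the cell itself
--                     grid[r][c] = "x"
--                     flipped += 1
--     return flipped
-- ===== Notes on version B (the rewrite author's own statement) =====
-- stated objective: alternative
-- what changed: B replaces the 8-offset neighbor enumeration plus deferred to_flip list with a snapshot copy and a single read-write pass that counts '@' in the clipped 3x3 slice block (minus the cell itself) and flips/counts immediately.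
import Mathlib
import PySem

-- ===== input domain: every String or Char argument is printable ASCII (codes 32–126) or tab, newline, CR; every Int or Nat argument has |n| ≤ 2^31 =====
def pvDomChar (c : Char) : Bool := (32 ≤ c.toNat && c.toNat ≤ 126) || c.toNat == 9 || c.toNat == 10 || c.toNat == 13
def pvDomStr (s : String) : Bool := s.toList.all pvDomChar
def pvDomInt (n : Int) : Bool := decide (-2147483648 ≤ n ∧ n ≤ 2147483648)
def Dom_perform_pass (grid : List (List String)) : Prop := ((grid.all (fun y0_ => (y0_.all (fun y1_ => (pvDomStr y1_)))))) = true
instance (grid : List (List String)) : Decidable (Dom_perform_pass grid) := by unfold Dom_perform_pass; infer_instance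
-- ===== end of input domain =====

-- B replaces the offset-enumeration + deferred to_flip list with a snapshot copy and a single
-- read-write pass summing '@' over clipped 3x3 row slices (minus the cell itself); both Pythons
-- mutate the grid identically, the equivalence proved here is about the RETURN value.

-- ===== PORT A =====
def pvOffsets : List (Int × Int) :=
  [(-1, -1), (-1, 0), (-1, 1), (0, -1), (0, 1), (1, -1), (1, 0), (1, 1)]

def neighbors_of (grid : List (List String)) (r c : Int) : List String :=
  let rows : Int := grid.length
  let cols : Int := (PySem.List.pyGetD grid 0 []).length
  pvOffsets.foldl (fun acc dd =>
    if 0 ≤ r + dd.1 ∧ r + dd.1 < rows ∧ 0 ≤ c + dd.2 ∧ c + dd.2 < cols then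
      acc ++ [PySem.List.pyGetD (PySem.List.pyGetD grid (r + dd.1) []) (c + dd.2) ""]
    else acc) []

def accessible (neighbors : List String) : Bool :=
  decide (neighbors.count "@" < 4)

def perform_pass (grid : List (List String)) : Int :=
  let rows : Int := grid.length
  let cols : Int := (PySem.List.pyGetD grid 0 []).length
  let toFlip : List (Int × Int) :=
    (PySem.List.pyRange 0 rows 1).foldl (fun acc r =>
      (PySem.List.pyRange 0 cols 1).foldl (fun acc c =>
        if PySem.List.pyGetD (PySem.List.pyGetD grid r []) c "" = "@" then
          if accessible (neighbors_of grid r c) then acc ++ [(r, c)] else acc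
        else acc) acc) []
  -- the flip loop mutates the grid in place and does not affect the return value
  (toFlip.length : Int)

-- ===== PORT B =====
def perform_pass_alt (grid : List (List String)) : Int :=
  let rows : Int := grid.length
  let cols : Int := (PySem.List.pyGetD grid 0 []).length
  let snap : List (List String) := grid.map (fun row => PySem.List.slice row none (some cols))
  (PySem.List.pyRange 0 rows 1).foldl (fun flipped r =>
    (PySem.List.pyRange 0 cols 1).foldl (fun flipped c =>
      if PySem.List.pyGetD (PySem.List.pyGetD snap r []) c "" = "@" then
        let block : Int :=
          (PySem.List.slice snap (some (max 0 (r - 1))) (some (r + 2))).foldl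
            (fun b segRow =>
              b + ((PySem.List.slice segRow (some (max 0 (c - 1))) (some (c + 2))).count "@" : Int)) 0
        if block - 1 < 4 then flipped + 1 else flipped
      else flipped) flipped) 0

-- ===== PRECONDITION & SPEC =====
-- Pre_ excludes exactly the inputs on which A raises IndexError: the empty grid (len(grid[0]))
-- and ragged grids with a row shorter than the first row (grid[r][c] for c < cols).
def Pre_perform_pass (grid : List (List String)) : Prop :=
  grid ≠ [] ∧ ∀ row ∈ grid, (PySem.List.pyGetD grid 0 []).length ≤ row.length
instance (grid : List (List String)) : Decidable (Pre_perform_pass grid) := by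
  unfold Pre_perform_pass; infer_instance

def pvWitness_perform_pass : List (List String) := [["@", "@"], [".", "@"]]

def Spec_perform_pass (grid : List (List String)) (out : Int) : Prop := out = perform_pass_alt grid
instance (grid : List (List String)) (out : Int) : Decidable (Spec_perform_pass grid out) := by
  unfold Spec_perform_pass; infer_instance

-- ===== CLAIM (what is proved, stated in full; the proofs are below) =====
def Claim_equal_perform_pass : Prop := ∀ (grid : List (List String)), Dom_perform_pass grid → Pre_perform_pass grid → Spec_perform_pass grid (perform_pass grid)

-- ===== LEMMAS AND PROOFS =====

-- sum of g over a 3-window slice, expressed pointwise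
def pvGuard {α : Type} (xs : List α) (d : α) (g : α → Int) (j : Int) : Int :=
  if 0 ≤ j ∧ j < (xs.length : Int) then g (PySem.List.pyGetD xs j d) else 0

-- sum over a drop/take segment as a guarded range sum
lemma pv_sum_seg {α : Type} (g : α → Int) (d : α) (t : Nat) :
    ∀ (xs : List α) (a : Nat),
    (((xs.drop a).take t).map g).sum
    = ((List.range t).map (fun i => if a + i < xs.length then g (xs.getD (a + i) d) else 0)).sum := by
  induction t with
  | zero => intro xs a; simp
  | succ t ih =>
    intro xs a
    by_cases ha : a < xs.length
    · rw [List.drop_eq_getElem_cons ha]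
      rw [List.take_succ_cons, List.map_cons, List.sum_cons, ih xs (a + 1),
        List.range_succ_eq_map, List.map_cons, List.sum_cons, List.map_map]
      have h1 : (if a + 0 < xs.length then g (xs.getD (a + 0) d) else 0) = g xs[a] := by
        simp [ha]
      rw [h1]
      congr 1
      refine congrArg List.sum (List.map_congr_left ?_)
      intro i _
      have hsum : a + 1 + i = a + (i + 1) := by omega
      simp [Function.comp, Nat.succ_eq_add_one, hsum]
    · rw [List.drop_eq_nil_of_le (by omega)]
      simp only [List.take_nil, List.map_nil, List.sum_nil]
      symm
      apply List.sum_eq_zero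
      intro x hx
      simp only [List.mem_map] at hx
      obtain ⟨i, _, hi⟩ := hx
      rw [if_neg (by omega)] at hi
      exact hi.symm

lemma pv_win {α : Type} (xs : List α) (d : α) (g : α → Int) (c : Int)
    (h0 : 0 ≤ c) (hc : c < (xs.length : Int)) :
    ((PySem.List.slice xs (some (max 0 (c - 1))) (some (c + 2))).map g).sum
    = pvGuard xs d g (c - 1) + pvGuard xs d g c + pvGuard xs d g (c + 1) := by
  rw [PySem.List.slice_toNat _ (by omega) (by omega)]
  rw [pv_sum_seg g d _ xs _]
  by_cases hc0 : c = 0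
  · subst hc0
    have hn : 0 < xs.length := by omega
    have ht : ((0:Int) + 2).toNat - (max 0 ((0:Int) - 1)).toNat = 2 := by decide
    rw [ht, show List.range 2 = [0, 1] from by decide,
      show (max 0 ((0:Int) - 1)).toNat = 0 from by decide]
    simp only [List.map_cons, List.map_nil, List.sum_cons, List.sum_nil, pvGuard]
    rw [show (0:ℕ) + 0 = 0 from rfl, show (0:ℕ) + 1 = 1 from rfl]
    rw [PySem.List.pyGetD_of_nonneg xs d (by omega : (0:Int) ≤ 0),
        PySem.List.pyGetD_of_nonneg xs d (by omega : (0:Int) ≤ 0 + 1)]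
    rw [show ((0:Int)).toNat = 0 from rfl, show ((0:Int) + 1).toNat = 1 from rfl]
    rw [if_neg (show ¬((0:Int) ≤ 0 - 1 ∧ (0:Int) - 1 < (xs.length:Int)) from by
          rintro ⟨h1, -⟩; omega),
        if_pos (show (0:Int) ≤ 0 ∧ (0:Int) < (xs.length:Int) from ⟨le_refl _, hc⟩),
        if_pos hn]
    by_cases h1 : 1 < xs.length
    · rw [if_pos h1, if_pos (show (0:Int) ≤ 0 + 1 ∧ (0:Int) + 1 < (xs.length:Int) from
          ⟨by omega, by omega⟩)]
      ring
    · rw [if_neg h1, if_neg (show ¬((0:Int) ≤ 0 + 1 ∧ (0:Int) + 1 < (xs.length:Int)) from by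
          rintro ⟨-, h2⟩; omega)]
      ring
  · have hcpos : 0 < c := lt_of_le_of_ne h0 (Ne.symm hc0)
    have hkn : c.toNat < xs.length := by omega
    have hA : (max 0 (c - 1)).toNat = c.toNat - 1 := by omega
    have ht : (c + 2).toNat - (max 0 (c - 1)).toNat = 3 := by omega
    rw [ht, show List.range 3 = [0, 1, 2] from by decide, hA]
    simp only [List.map_cons, List.map_nil, List.sum_cons, List.sum_nil, pvGuard]
    rw [show c.toNat - 1 + 0 = c.toNat - 1 from by omega,
        show c.toNat - 1 + 1 = c.toNat from by omega,
        show c.toNat - 1 + 2 = c.toNat + 1 from by omega]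
    rw [PySem.List.pyGetD_of_nonneg xs d (by omega : (0:Int) ≤ c - 1),
        PySem.List.pyGetD_of_nonneg xs d h0,
        PySem.List.pyGetD_of_nonneg xs d (by omega : (0:Int) ≤ c + 1)]
    rw [show (c - 1).toNat = c.toNat - 1 from by omega,
        show (c + 1).toNat = c.toNat + 1 from by omega]
    rw [if_pos (show c.toNat - 1 < xs.length from by omega),
        if_pos hkn,
        if_pos (show (0:Int) ≤ c - 1 ∧ c - 1 < (xs.length:Int) from ⟨by omega, by omega⟩),
        if_pos (show (0:Int) ≤ c ∧ c < (xs.length:Int) from ⟨h0, hc⟩)]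
    by_cases h2 : c.toNat + 1 < xs.length
    · rw [if_pos h2, if_pos (show (0:Int) ≤ c + 1 ∧ c + 1 < (xs.length:Int) from
          ⟨by omega, by omega⟩)]
      ring
    · rw [if_neg h2, if_neg (show ¬((0:Int) ≤ c + 1 ∧ c + 1 < (xs.length:Int)) from by
          rintro ⟨-, h3⟩; omega)]
      ring

-- count of a conditional-append fold (A's neighbor list)
lemma pv_count_foldl {α β : Type} [BEq β] [LawfulBEq β] [DecidableEq β] (l : List α) (p : α → Prop) [DecidablePred p]
    (f : α → β) (v : β) :
    ∀ acc : List β,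
    ((l.foldl (fun a x => if p x then a ++ [f x] else a) acc).count v : Int)
    = (acc.count v : Int) + (l.map (fun x => if p x ∧ f x = v then (1 : Int) else 0)).sum := by
  induction l with
  | nil => intro acc; simp
  | cons x l ih =>
    intro acc
    simp only [List.foldl_cons, List.map_cons, List.sum_cons]
    by_cases hp : p x
    · rw [if_pos hp, ih]
      have : ((acc ++ [f x]).count v : Int) = (acc.count v : Int) + (if p x ∧ f x = v then (1:Int) else 0) := by
        by_cases hv : f x = v <;> simp [List.count_append, hp, hv]
      rw [this]; ring
    · rw [if_neg hp, ih]
      have : (if p x ∧ f x = v then (1:Int) else 0) = 0 := by simp [hp]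
      rw [this]; ring

-- nested double-loop aggregation: list-append count vs integer counter
lemma pv_inner {γ : Type} (cs : List Int) (PA QA PB QB : Int → Prop)
    [DecidablePred PA] [DecidablePred QA] [DecidablePred PB] [DecidablePred QB]
    (g : Int → γ)
    (h : ∀ c ∈ cs, (PA c ∧ QA c) ↔ (PB c ∧ QB c)) :
    ∀ (L : List γ) (k : Int), k = L.length →
    ((cs.foldl (fun a c => if PA c then (if QA c then a ++ [g c] else a) else a) L).length : Int)
    = cs.foldl (fun a c => if PB c then (if QB c then a + 1 else a) else a) k := by
  induction cs with
  | nil => intro L k hk; simpa using hk.symm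
  | cons c cs ih =>
    intro L k hk
    simp only [List.foldl_cons]
    by_cases hA : PA c ∧ QA c
    · rw [if_pos hA.1, if_pos hA.2]
      have hB := (h c (by simp)).mp hA
      rw [if_pos hB.1, if_pos hB.2]
      exact ih (fun c hc => h c (by simp [hc])) _ _ (by simp [hk])
    · have hB : ¬(PB c ∧ QB c) := fun hB => hA ((h c (by simp)).mpr hB)
      have e1 : (if PA c then (if QA c then L ++ [g c] else L) else L) = L := by
        split_ifs with h1 h2
        · exact absurd ⟨h1, h2⟩ hA
        · rfl
        · rfl
      have e2 : (if PB c then (if QB c then k + 1 else k) else k) = k := by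
        split_ifs with h1 h2
        · exact absurd ⟨h1, h2⟩ hB
        · rfl
        · rfl
      rw [e1, e2]
      exact ih (fun c hc => h c (by simp [hc])) _ _ hk

lemma pv_agg (rs cs : List Int) (PA QA PB QB : Int → Int → Prop)
    [∀ r c, Decidable (PA r c)] [∀ r c, Decidable (QA r c)]
    [∀ r c, Decidable (PB r c)] [∀ r c, Decidable (QB r c)]
    (h : ∀ r ∈ rs, ∀ c ∈ cs, (PA r c ∧ QA r c) ↔ (PB r c ∧ QB r c)) :
    ∀ (L : List (Int × Int)) (k : Int), k = L.length →
    ((rs.foldl (fun a r => cs.foldl (fun a c =>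
        if PA r c then (if QA r c then a ++ [(r, c)] else a) else a) a) L).length : Int)
    = rs.foldl (fun a r => cs.foldl (fun a c =>
        if PB r c then (if QB r c then a + 1 else a) else a) a) k := by
  induction rs with
  | nil => intro L k hk; simpa using hk.symm
  | cons r rs ih =>
    intro L k hk
    simp only [List.foldl_cons]
    exact ih (fun r hr c hc => h r (by simp [hr]) c hc) _ _
      (pv_inner cs (PA r) (QA r) (PB r) (QB r) (fun c => (r, c))
        (fun c hc => h r (by simp) c hc) L k hk).symm

-- 0/1 indicator of an in-bounds '@' cell, the common normal form of both neighbor counts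
def pvCell (grid : List (List String)) (i j : Int) : Int :=
  if 0 ≤ i ∧ i < (grid.length : Int) ∧ 0 ≤ j ∧ j < ((PySem.List.pyGetD grid 0 []).length : Int)
      ∧ PySem.List.pyGetD (PySem.List.pyGetD grid i []) j "" = "@" then 1 else 0

lemma pv_count_sum (l : List String) (v : String) :
    (List.count v l : Int) = (l.map (fun x => if x = v then (1 : Int) else 0)).sum := by
  rw [List.count_eq_countP, ← PySem.List.sum_map_ite_one_zero (fun x => x == v) l]
  simp

lemma pv_snap_row (grid : List (List String)) (r : Int) (h0 : 0 ≤ r) (hn : r < (grid.length : Int)) :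
    PySem.List.pyGetD (grid.map (fun row =>
      PySem.List.slice row none (some ((PySem.List.pyGetD grid 0 []).length : Int)))) r []
    = (PySem.List.pyGetD grid r []).take (PySem.List.pyGetD grid 0 []).length := by
  rw [PySem.List.pyGetD_eq_getElem _ _ h0 (by simp; omega),
      PySem.List.pyGetD_eq_getElem _ _ h0 hn]
  simp [PySem.List.slice_to_natCast]

lemma pv_row_len (grid : List (List String))
    (hpre : ∀ row ∈ grid, (PySem.List.pyGetD grid 0 []).length ≤ row.length)
    (r : Int) (h0 : 0 ≤ r) (hn : r < (grid.length : Int)) :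
    ((PySem.List.pyGetD grid r []).take (PySem.List.pyGetD grid 0 []).length).length
    = (PySem.List.pyGetD grid 0 []).length := by
  rw [List.length_take]
  have : (PySem.List.pyGetD grid 0 []).length ≤ (PySem.List.pyGetD grid r []).length := by
    rw [PySem.List.pyGetD_eq_getElem _ _ h0 hn]
    exact hpre _ (List.getElem_mem _)
  omega

lemma pv_take_cell (row : List String) (m : Nat) (hm : m ≤ row.length) (j : Int)
    (hj0 : 0 ≤ j) (hjm : j < (m : Int)) :
    PySem.List.pyGetD (row.take m) j "" = PySem.List.pyGetD row j "" := by
  rw [PySem.List.pyGetD_eq_getElem _ _ hj0 (by rw [List.length_take]; omega),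
      PySem.List.pyGetD_eq_getElem _ _ hj0 (by omega)]
  exact List.getElem_take

lemma pv_cell_merge (grid : List (List String)) (i j : Int) :
    (if (0 ≤ i ∧ i < (grid.length : Int) ∧ 0 ≤ j ∧ j < ((PySem.List.pyGetD grid 0 []).length : Int))
        ∧ PySem.List.pyGetD (PySem.List.pyGetD grid i []) j "" = "@" then (1 : Int) else 0)
    = pvCell grid i j := by
  unfold pvCell
  exact if_congr (by tauto) rfl rfl

-- B's 3x3 block sum = A's neighbor count + the center indicator
lemma pv_block (grid : List (List String))
    (hpre : ∀ row ∈ grid, (PySem.List.pyGetD grid 0 []).length ≤ row.length)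
    (r c : Int) (hr0 : 0 ≤ r) (hrn : r < (grid.length : Int))
    (hc0 : 0 ≤ c) (hcm : c < ((PySem.List.pyGetD grid 0 []).length : Int)) :
    (PySem.List.slice (grid.map (fun row =>
        PySem.List.slice row none (some ((PySem.List.pyGetD grid 0 []).length : Int))))
        (some (max 0 (r - 1))) (some (r + 2))).foldl
      (fun b segRow =>
        b + (List.count "@" (PySem.List.slice segRow (some (max 0 (c - 1))) (some (c + 2))) : Int)) 0
    = ((neighbors_of grid r c).count "@" : Int)
      + (if PySem.List.pyGetD (PySem.List.pyGetD grid r []) c "" = "@" then 1 else 0) := by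
  rw [PySem.List.foldl_add, zero_add]
  rw [pv_win _ [] _ r hr0 (by simpa using hrn)]
  -- each guarded row contributes a 3-term sum of cell indicators
  have hrow : ∀ i : Int,
      pvGuard (grid.map (fun row =>
          PySem.List.slice row none (some ((PySem.List.pyGetD grid 0 []).length : Int)))) []
        (fun segRow =>
          (List.count "@" (PySem.List.slice segRow (some (max 0 (c - 1))) (some (c + 2))) : Int)) i
      = pvCell grid i (c - 1) + pvCell grid i c + pvCell grid i (c + 1) := by
    intro i
    unfold pvGuard
    by_cases hi : 0 ≤ i ∧ i < ((grid.map (fun row =>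
        PySem.List.slice row none (some ((PySem.List.pyGetD grid 0 []).length : Int)))).length : Int)
    · rw [if_pos hi]
      have hin : i < (grid.length : Int) := by simpa using hi.2
      rw [pv_snap_row grid i hi.1 hin]
      beta_reduce
      rw [pv_count_sum]
      rw [pv_win _ "" _ c hc0 (by rw [pv_row_len grid hpre i hi.1 hin]; exact hcm)]
      have hcell : ∀ j : Int,
          pvGuard ((PySem.List.pyGetD grid i []).take (PySem.List.pyGetD grid 0 []).length) ""
            (fun x => if x = "@" then (1 : Int) else 0) j
          = pvCell grid i j := by
        intro j
        unfold pvGuard pvCell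
        rw [pv_row_len grid hpre i hi.1 hin]
        by_cases hj : 0 ≤ j ∧ j < ((PySem.List.pyGetD grid 0 []).length : Int)
        · rw [if_pos hj]
          have hm : (PySem.List.pyGetD grid 0 []).length ≤ (PySem.List.pyGetD grid i []).length := by
            rw [PySem.List.pyGetD_eq_getElem _ _ hi.1 hin]
            exact hpre _ (List.getElem_mem _)
          rw [pv_take_cell _ _ hm j hj.1 hj.2]
          beta_reduce
          split_ifs with h1 h2 h3 <;> first | rfl | (exfalso; tauto)
        · rw [if_neg hj, if_neg (by tauto)]
      rw [hcell, hcell, hcell]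
    · rw [if_neg hi]
      have hout : ¬(0 ≤ i ∧ i < (grid.length : Int)) := by
        intro h; exact hi ⟨h.1, by simpa using h.2⟩
      have z : ∀ j : Int, pvCell grid i j = 0 := by
        intro j; unfold pvCell; rw [if_neg (by tauto)]
      rw [z, z, z]; ring
  rw [hrow, hrow, hrow]
  -- A's neighbor count as the 8 off-center indicators
  have hA : ((neighbors_of grid r c).count "@" : Int)
      = pvCell grid (r + -1) (c + -1) + pvCell grid (r + -1) (c + 0) + pvCell grid (r + -1) (c + 1)
        + pvCell grid (r + 0) (c + -1) + pvCell grid (r + 0) (c + 1)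
        + pvCell grid (r + 1) (c + -1) + pvCell grid (r + 1) (c + 0) + pvCell grid (r + 1) (c + 1) := by
    show ((List.count "@" (neighbors_of grid r c) : Nat) : Int) = _
    unfold neighbors_of
    rw [pv_count_foldl]
    simp only [pvOffsets, List.map_cons, List.map_nil, List.sum_cons, List.sum_nil,
      List.count_nil, Nat.cast_zero, zero_add, add_zero]
    rw [pv_cell_merge, pv_cell_merge, pv_cell_merge, pv_cell_merge, pv_cell_merge,
      pv_cell_merge, pv_cell_merge, pv_cell_merge]
    ring
  rw [hA]
  -- the center indicator
  have hcent : (if PySem.List.pyGetD (PySem.List.pyGetD grid r []) c "" = "@" then (1 : Int) else 0)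
      = pvCell grid r c := by
    unfold pvCell
    exact if_congr (by tauto) rfl rfl
  rw [hcent]
  have e1 : ∀ x : Int, x + -1 = x - 1 := fun x => by ring
  have e2 : ∀ x : Int, x + 0 = x := fun x => by ring
  rw [e1 r, e1 c, e2 r, e2 c]
  ring

-- ===== VERDICT (by name: the statement is the Claim_ definition above) =====
theorem perform_pass_spec : Claim_equal_perform_pass := by
  intro grid _hdom hpre
  obtain ⟨-, hlen⟩ := hpre
  show perform_pass grid = perform_pass_alt grid
  simp only [perform_pass, perform_pass_alt]
  refine pv_agg _ _
    (fun r c => PySem.List.pyGetD (PySem.List.pyGetD grid r []) c "" = "@")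
    (fun r c => accessible (neighbors_of grid r c) = true)
    (fun r c => PySem.List.pyGetD (PySem.List.pyGetD (grid.map (fun row =>
        PySem.List.slice row none (some ((PySem.List.pyGetD grid 0 []).length : Int)))) r []) c ""
        = "@")
    (fun r c => (PySem.List.slice (grid.map (fun row =>
        PySem.List.slice row none (some ((PySem.List.pyGetD grid 0 []).length : Int))))
        (some (max 0 (r - 1))) (some (r + 2))).foldl
      (fun b segRow =>
        b + (List.count "@" (PySem.List.slice segRow (some (max 0 (c - 1))) (some (c + 2))) : Int)) 0
      - 1 < 4)
    ?_ [] 0 rfl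
  intro r hr c hc
  beta_reduce
  rw [PySem.List.mem_pyRange_one] at hr hc
  have hcellEq : PySem.List.pyGetD (PySem.List.pyGetD (grid.map (fun row =>
      PySem.List.slice row none (some ((PySem.List.pyGetD grid 0 []).length : Int)))) r []) c ""
      = PySem.List.pyGetD (PySem.List.pyGetD grid r []) c "" := by
    rw [pv_snap_row grid r hr.1 hr.2]
    have hm : (PySem.List.pyGetD grid 0 []).length ≤ (PySem.List.pyGetD grid r []).length := by
      rw [PySem.List.pyGetD_eq_getElem _ _ hr.1 hr.2]
      exact hlen _ (List.getElem_mem _)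
    exact pv_take_cell _ _ hm c hc.1 hc.2
  rw [hcellEq]
  have hb := pv_block grid hlen r c hr.1 hr.2 hc.1 hc.2
  constructor
  · rintro ⟨hat, hacc⟩
    refine ⟨hat, ?_⟩
    rw [hb, if_pos hat]
    simp only [accessible, decide_eq_true_eq] at hacc
    omega
  · rintro ⟨hat, hlt⟩
    refine ⟨hat, ?_⟩
    rw [hb, if_pos hat] at hlt
    simp only [accessible, decide_eq_true_eq]
    omega
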